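-- pv_equiv track=rewrite | github.com/TedCassirer/advent-of-code | aoc_cas/aoc2025/day6.py | parse_by_column
-- ===== SOURCE A (Python) =====
-- from functools import reduce
--
-- def add(a: int, b: int) -> int:
--     return a + b
--
-- def multiply(a: int, b: int) -> int:
--     return a * b
--
-- def parse_by_column(input: str) -> int:
--     lines = input.splitlines()
--     columns: list[int] = []
--     ans = 0
--     for col in range(len(lines[0]) - 1, -1, -1):
--         col_num = 0
--         for row in range(len(lines)):
--             char = lines[row][col]
--             if char.isdigit():
--                 col_num = col_num * 10 + int(char)
--             elif char == "*" or char == "+":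
--                 op = multiply if char == "*" else add
--                 columns.append(col_num)
--                 ans += reduce(op, columns)
--                 columns.clear()
--                 col_num = 0
--                 break
--         if col_num != 0:
--             columns.append(col_num)
--     return ans
-- ===== SOURCE B (Python) =====
-- def parse_by_column(input: str) -> int:
--     lines = input.splitlines()
--     width = len(lines[0])
--     # phase 1: ROW-major scan; one parser state per column: (number so far, operator seen or None)
--     states = [(0, None)] * width
--     for line in lines:
--         states = [
--             st if st[1] is not None
--             else (st[0] * 10 + int(line[c]), None) if line[c].isdigit()
--             else (st[0], line[c]) if line[c] in "*+"
--             else st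
--             for c, st in enumerate(states)
--         ]
--     # phase 2: right-to-left over the column states with running sum and product (no pending list)
--     ans = s = 0
--     p = 1
--     for num, op in reversed(states):
--         if op is None:
--             if num != 0:
--                 s += num
--                 p *= num
--         else:
--             ans += s + num if op == "+" else p * num
--             s, p = 0, 1
--     return ans
-- ===== Notes on version B (the rewrite author's own statement) =====
-- stated objective: alternative
-- what changed: B replaces A's column-major nested index loops and pending-list reduce by a row-major single fold that advances one parser state per column (number, operator) across all columns at once, then one reversed pass over the column states keeping a running sum and running product instead of a list.
-- outside the precondition, e.g. on parse_by_column('1+\n2'): A returns 0, B returns 0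
import Mathlib
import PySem

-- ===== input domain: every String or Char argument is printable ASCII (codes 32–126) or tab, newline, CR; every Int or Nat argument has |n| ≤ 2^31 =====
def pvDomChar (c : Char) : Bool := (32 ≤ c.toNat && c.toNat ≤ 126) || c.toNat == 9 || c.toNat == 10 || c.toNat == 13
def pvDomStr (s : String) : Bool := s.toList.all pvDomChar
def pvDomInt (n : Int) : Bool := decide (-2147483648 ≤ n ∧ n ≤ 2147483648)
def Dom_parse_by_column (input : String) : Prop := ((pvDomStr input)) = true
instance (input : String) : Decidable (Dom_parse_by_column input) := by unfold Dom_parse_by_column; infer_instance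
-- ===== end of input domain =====

-- B re-decomposes A: one row-major fold advancing a parser state per column, then one reversed
-- pass over the states with a running sum and product (no pending list). Return value only.

-- ===== PORT A =====

-- lines[row][col]; the defaults are unreachable under Pre_ (Python raises IndexError there)
def pvCharAt (lines : List (List Char)) (row col : Int) : Char :=
  PySem.List.pyGetD (PySem.List.pyGetD lines row []) col ' '

-- functools.reduce(f, l) (l nonempty under use; reduce raises on [], unreachable)
def pvReduce (f : Int → Int → Int) : List Int → Int
  | [] => 0
  | x :: xs => xs.foldl f x

-- A's inner 'for row in range(len(lines))' loop with break; returns (columns, ans, col_num)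
def pvRowsA (lines : List (List Char)) (col : Int) :
    List Int → Int → List Int → Int → (List Int × Int × Int)
  | [], col_num, columns, ans => (columns, ans, col_num)
  | r :: rs, col_num, columns, ans =>
    let char := pvCharAt lines r col
    if PySem.Chars.isdigit char then
      pvRowsA lines col rs (col_num * 10 + ((char.toNat : Int) - 48)) columns ans
    else if char = '*' ∨ char = '+' then
      let cols' := columns ++ [col_num]
      let v := if char = '*' then pvReduce (· * ·) cols' else pvReduce (· + ·) cols'
      ([], ans + v, 0)
    else
      pvRowsA lines col rs col_num columns ans

-- A's outer 'for col in range(len(lines[0]) - 1, -1, -1)' loop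
def pvColsA (lines : List (List Char)) (n : Int) :
    List Int → List Int → Int → Int
  | [], _, ans => ans
  | c :: cs, columns, ans =>
    match pvRowsA lines c (PySem.List.pyRange 0 n 1) 0 columns ans with
    | (columns', ans', col_num) =>
      if col_num ≠ 0 then pvColsA lines n cs (columns' ++ [col_num]) ans'
      else pvColsA lines n cs columns' ans'

def parse_by_column (input : String) : Int :=
  let lines := (PySem.Str.splitlines input).map String.toList
  pvColsA lines (lines.length : Int)
    (PySem.List.pyRange (((lines.headD []).length : Int) - 1) (-1) (-1)) [] 0

-- ===== PORT B =====

-- one step of B's per-column parser state (number so far, operator or None) on this row's char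
def pvStepB (line : List Char) (c : Int) (st : Int × Option Char) : Int × Option Char :=
  match st.2 with
  | some _ => st
  | none =>
    let ch := PySem.List.pyGetD line c ' '   -- line[c]; default unreachable under Pre_
    if PySem.Chars.isdigit ch then (st.1 * 10 + ((ch.toNat : Int) - 48), none)
    else if ch = '*' ∨ ch = '+' then (st.1, some ch)
    else st

-- B's phase 2: reversed pass over the column states with running sum s and product p
def pvPhase2 : List (Int × Option Char) → Int → Int → Int → Int
  | [], ans, _, _ => ans
  | (num, none) :: rest, ans, s, p =>
    if num ≠ 0 then pvPhase2 rest ans (s + num) (p * num) else pvPhase2 rest ans s p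
  | (num, some ch) :: rest, ans, s, p =>
    pvPhase2 rest (ans + (if ch = '+' then s + num else p * num)) 0 1

def parse_by_column_alt (input : String) : Int :=
  let lines := (PySem.Str.splitlines input).map String.toList
  let width := (lines.headD []).length
  let states := lines.foldl
    (fun states line => (PySem.List.enumerate states).map (fun p => pvStepB line p.1 p.2))
    (List.replicate width ((0 : Int), (none : Option Char)))
  pvPhase2 states.reverse 0 0 1

-- ===== PRECONDITION & SPEC =====
-- Pre_ excludes the empty input (lines[0] raises IndexError) and ragged inputs whose lines are
-- shorter than the first line: there both programs raise IndexError unless every short row lies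
-- below its column's operator (where both happen to return the same value); the ports read such
-- out-of-range cells through a default, so those inputs are excluded rather than claimed.
def Pre_parse_by_column (input : String) : Prop :=
  let lines := (PySem.Str.splitlines input).map String.toList
  lines ≠ [] ∧ ∀ l ∈ lines, (lines.headD []).length ≤ l.length
instance (input : String) : Decidable (Pre_parse_by_column input) := by
  unfold Pre_parse_by_column; infer_instance

def pvWitness_parse_by_column : String := "12\n+*"

def Spec_parse_by_column (input : String) (out : Int) : Prop := out = parse_by_column_alt input
instance (input : String) (out : Int) : Decidable (Spec_parse_by_column input out) := by
  unfold Spec_parse_by_column; infer_instance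

-- ===== CLAIM (what is proved, stated in full; the proofs are below) =====
def Claim_equal_parse_by_column : Prop := ∀ (input : String), Dom_parse_by_column input → Pre_parse_by_column input → Spec_parse_by_column input (parse_by_column input)

-- ===== LEMMAS AND PROOFS =====

-- proof-layer column parser: number before the first operator and that operator, as A computes it
def pvParseCol : List Char → Int → Int × Option Char
  | [], acc => (acc, none)
  | ch :: rest, acc =>
    if PySem.Chars.isdigit ch then pvParseCol rest (acc * 10 + ((ch.toNat : Int) - 48))
    else if ch = '*' ∨ ch = '+' then (acc, some ch)
    else pvParseCol rest acc

-- the char a column-c state step consumes, as a function of the line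
def pvColChar (c : Int) (line : List Char) : Char := PySem.List.pyGetD line c ' '

-- B's step, seen at the char level
def pvCharStep (st : Int × Option Char) (ch : Char) : Int × Option Char :=
  match st.2 with
  | some _ => st
  | none =>
    if PySem.Chars.isdigit ch then (st.1 * 10 + ((ch.toNat : Int) - 48), none)
    else if ch = '*' ∨ ch = '+' then (st.1, some ch)
    else st

lemma pv_stepB_char (line : List Char) (c : Int) (st : Int × Option Char) :
    pvStepB line c st = pvCharStep st (pvColChar c line) := by
  cases st with
  | mk n o => cases o <;> rfl

-- reduce over a nonempty list vs fold from the identity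
lemma pv_foldl_add_init (xs : List Int) (a : Int) : xs.foldl (· + ·) a = a + xs.sum := by
  induction xs generalizing a with
  | nil => simp
  | cons x xs ih => simp [List.foldl_cons, ih, List.sum_cons]; ring

lemma pv_foldl_mul_init (xs : List Int) (a : Int) : xs.foldl (· * ·) a = a * xs.prod := by
  induction xs generalizing a with
  | nil => simp
  | cons x xs ih => simp [List.foldl_cons, ih, List.prod_cons]; ring

lemma pv_reduce_add (x : Int) (xs : List Int) :
    pvReduce (· + ·) (x :: xs) = (x :: xs).sum := by
  simp [pvReduce, pv_foldl_add_init, List.sum_cons]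

lemma pv_reduce_mul (x : Int) (xs : List Int) :
    pvReduce (· * ·) (x :: xs) = (x :: xs).foldl (· * ·) 1 := by
  simp [pvReduce, pv_foldl_mul_init, List.foldl_cons]

-- A's inner row loop computes exactly pvParseCol on the extracted column characters
lemma pv_rows_eq (lines : List (List Char)) (col : Int) (rows : List Int)
    (cn : Int) (columns : List Int) (ans : Int) :
    pvRowsA lines col rows cn columns ans =
      match pvParseCol (rows.map (fun r => pvCharAt lines r col)) cn with
      | (num, none) => (columns, ans, num)
      | (num, some ch) =>
        ([], ans + (if ch = '+' then (columns ++ [num]).sum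
                    else (columns ++ [num]).foldl (· * ·) 1), 0) := by
  induction rows generalizing cn with
  | nil => simp [pvRowsA, pvParseCol]
  | cons r rs ih =>
    simp only [pvRowsA, List.map_cons, pvParseCol]
    by_cases hd : PySem.Chars.isdigit (pvCharAt lines r col)
    · simp only [hd, if_true]; exact ih _
    · simp only [hd]
      by_cases hop : pvCharAt lines r col = '*' ∨ pvCharAt lines r col = '+'
      · simp only [hop, if_true]
        rcases hop with h | h
        · cases hc : columns ++ [cn] with
          | nil => simp at hc
          | cons x xs => simp [h, hc, pv_reduce_mul]
        · cases hc : columns ++ [cn] with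
          | nil => simp at hc
          | cons x xs => simp [h, hc, pv_reduce_add]
      · simp only [hop]; exact ih _

-- B's step after an operator is recorded is the identity
lemma pv_step_some (chars : List Char) (n : Int) (ch : Char) :
    chars.foldl pvCharStep (n, some ch) = (n, some ch) := by
  induction chars with
  | nil => rfl
  | cons c cs ih => simpa [pvCharStep] using ih

-- B's char-level state fold equals pvParseCol
lemma pv_step_fold (chars : List Char) (n : Int) :
    chars.foldl pvCharStep (n, none) = pvParseCol chars n := by
  induction chars generalizing n with
  | nil => rfl
  | cons c cs ih =>
    simp only [List.foldl_cons, pvCharStep, pvParseCol]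
    by_cases hd : PySem.Chars.isdigit c
    · simp [hd, ih]
    · by_cases hop : c = '*' ∨ c = '+'
      · simp [hd, hop, pv_step_some]
      · simp [hd, hop, ih]

-- enumerate of a mapped enumerate keeps the same indices
lemma pv_enum_map {α β : Type} (xs : List α) (s : Int) (f : Int × α → β) :
    PySem.List.enumerate ((PySem.List.enumerate xs s).map f) s
      = (PySem.List.enumerate xs s).map (fun p => (p.1, f p)) := by
  induction xs generalizing s with
  | nil => simp [PySem.List.enumerate_nil]
  | cons x xs ih => simp [PySem.List.enumerate_cons, ih]

-- B's phase-1 fold over rows = per-column fold, pointwise over the enumerated initial states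
lemma pv_phase1 (lines : List (List Char)) (states : List (Int × Option Char)) :
    lines.foldl
        (fun st line => (PySem.List.enumerate st).map (fun p => pvStepB line p.1 p.2)) states
      = (PySem.List.enumerate states).map
          (fun p => lines.foldl (fun st line => pvStepB line p.1 st) p.2) := by
  induction lines generalizing states with
  | nil => simp [PySem.List.map_snd_enumerate]
  | cons line rest ih =>
    simp only [List.foldl_cons, ih, pv_enum_map, List.map_map]
    rfl

-- enumerate of a replicate is a range paired with the constant
lemma pv_enum_replicate {α : Type} (w : Nat) (x : α) : ∀ s : Int,
    PySem.List.enumerate (List.replicate w x) s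
      = (PySem.List.pyRange s (s + w) 1).map (fun c => (c, x)) := by
  induction w with
  | zero => intro s; simp [PySem.List.enumerate_nil, PySem.List.pyRange_one_eq_nil]
  | succ w ih =>
    intro s
    have hb : s + ((w + 1 : Nat) : Int) = (s + 1) + (w : Int) := by push_cast; ring
    rw [List.replicate_succ, PySem.List.enumerate_cons, hb,
        PySem.List.pyRange_one_cons (by omega), List.map_cons, ih]

-- per-column fold over the rows = pvParseCol on the column characters
lemma pv_col_fold (lines : List (List Char)) (c : Int) :
    lines.foldl (fun st line => pvStepB line c st) ((0 : Int), (none : Option Char))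
      = pvParseCol (lines.map (pvColChar c)) 0 := by
  have h : lines.foldl (fun st line => pvStepB line c st) ((0 : Int), (none : Option Char))
      = lines.foldl (fun st line => pvCharStep st (pvColChar c line)) (0, none) := by
    simp [pv_stepB_char]
  rw [h, ← List.foldl_map, pv_step_fold]

-- A's column characters are B's
lemma pv_colchars (lines : List (List Char)) (c : Int) :
    (PySem.List.pyRange 0 (lines.length : Int) 1).map (fun r => pvCharAt lines r c)
      = lines.map (pvColChar c) := by
  have h : (PySem.List.pyRange 0 (lines.length : Int) 1).map (fun r => pvCharAt lines r c)
      = ((PySem.List.pyRange 0 (lines.length : Int) 1).map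
          (fun r => PySem.List.pyGetD lines r [])).map (pvColChar c) := by
    rw [List.map_map]; rfl
  rw [h, PySem.List.map_pyGetD_pyRange_zero']

-- A's grouping loop with a pending list = B's phase 2 with running sum and product
lemma pv_group (lines : List (List Char)) (cs : List Int) (columns : List Int) (ans : Int) :
    pvColsA lines (lines.length : Int) cs columns ans
      = pvPhase2 (cs.map (fun c => pvParseCol (lines.map (pvColChar c)) 0)) ans
          columns.sum (columns.foldl (· * ·) 1) := by
  induction cs generalizing columns ans with
  | nil => simp [pvColsA, pvPhase2]
  | cons c cs ih =>
    simp only [pvColsA, List.map_cons, pv_rows_eq, pv_colchars]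
    cases hp : pvParseCol (lines.map (pvColChar c)) 0 with
    | mk num op =>
      cases op with
      | none =>
        by_cases hn : num ≠ 0
        · simp [hn, pvPhase2, ih, List.foldl_append, pv_foldl_mul_init,
                List.sum_append]
        · simp at hn; simp [hn, pvPhase2, ih]
      | some ch =>
        simp [pvPhase2, ih, List.foldl_append, pv_foldl_mul_init, List.sum_append]

-- ===== VERDICT (by name: the statement is the Claim_ definition above) =====
theorem parse_by_column_spec : Claim_equal_parse_by_column := by
  intro input _ _
  unfold Spec_parse_by_column parse_by_column parse_by_column_alt
  simp only []
  rw [pv_group]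
  rw [pv_phase1, pv_enum_replicate, List.map_map]
  rw [PySem.List.pyRange_neg_one_eq_reverse, List.map_reverse]
  norm_num
  congr 1
  congr 1
  apply List.map_congr_left
  intro c _
  simp [Function.comp, pv_col_fold]
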